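-- pv_equiv track=rewrite | github.com/Laxman824/COL726-NumericalAlgos- | prev/solns/Homework 1/q3_fib64.py | fibonacciback
-- ===== SOURCE A (Python) =====
-- def fibonacciback(l,n):
-- 	if n < 2:
-- 		return 0
-- 	i = n-1
-- 	low = l[n-1]
-- 	high = l[n]
-- 	while (i > 0):
-- 		temp = high-low
-- 		high = low
-- 		low = temp
-- 		i -= 1
-- 	return low
-- ===== SOURCE B (Python) =====
-- def _fib_pair(m):
--     # fast doubling: returns (F(m), F(m+1))
--     if m == 0:
--         return (0, 1)
--     f, g = _fib_pair(m >> 1)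
--     c = f * (2 * g - f)
--     d = f * f + g * g
--     if m & 1:
--         return (d, c + d)
--     return (c, d)
--
-- def fibonacciback(l, n):
--     if n < 2:
--         return 0
--     a = l[n-1]
--     b = l[n]
--     k = n - 1
--     fk, fk1 = _fib_pair(k)
--     sign = -1 if k % 2 == 1 else 1
--     return sign * (fk1 * a - fk * b)
-- ===== Notes on version B (the rewrite author's own statement) =====
-- stated objective: faster
-- what changed: Replaced the O(n) backward-iteration while loop by the closed form (-1)^(n-1)*(F(n)*l[n-1] - F(n-1)*l[n]) with Fibonacci numbers computed by fast doubling.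
import Mathlib
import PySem

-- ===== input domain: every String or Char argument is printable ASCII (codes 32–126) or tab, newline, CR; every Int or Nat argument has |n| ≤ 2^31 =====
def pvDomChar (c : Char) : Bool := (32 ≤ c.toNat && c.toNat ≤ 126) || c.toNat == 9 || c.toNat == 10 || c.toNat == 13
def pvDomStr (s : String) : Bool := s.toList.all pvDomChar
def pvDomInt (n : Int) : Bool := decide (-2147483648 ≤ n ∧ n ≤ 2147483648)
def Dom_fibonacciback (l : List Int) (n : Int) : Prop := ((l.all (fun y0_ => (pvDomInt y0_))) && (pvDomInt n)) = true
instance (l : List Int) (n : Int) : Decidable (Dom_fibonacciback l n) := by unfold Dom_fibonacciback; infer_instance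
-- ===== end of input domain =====

-- B replaces A's O(n) backward-iteration loop by a closed form via Fibonacci
-- fast doubling (O(log n) arithmetic steps): after k steps the loop value is
-- (-1)^k (F(k+1)*l[n-1] - F(k)*l[n]).

-- ===== PORT A =====
-- the while loop: i counts down, state (low, high) → (high - low, low)
def fibLoopA : Nat → Int → Int → Int
  | 0, low, _ => low
  | k + 1, low, high => fibLoopA k (high - low) low

def fibonacciback (l : List Int) (n : Int) : Int :=
  if n < 2 then 0
  else
    match PySem.List.pyGet? l (n - 1), PySem.List.pyGet? l n with
    | some low, some high => fibLoopA (n - 1).toNat low high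
    | _, _ => 0  -- unreachable under Pre_fibonacciback (Python raises IndexError)

-- ===== PORT B =====
-- fast doubling: fibPair m = (F m, F (m+1))
def fibPair (m : Nat) : Int × Int :=
  if h : m = 0 then (0, 1)
  else
    let p := fibPair (m / 2)
    let c := p.1 * (2 * p.2 - p.1)
    let d := p.1 * p.1 + p.2 * p.2
    if m % 2 = 1 then (d, c + d) else (c, d)
  decreasing_by exact Nat.div_lt_self (Nat.pos_of_ne_zero h) (by norm_num)

def fibonacciback_alt (l : List Int) (n : Int) : Int :=
  if n < 2 then 0
  else
    match PySem.List.pyGet? l (n - 1) with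
    | none => 0  -- unreachable under Pre_fibonacciback (Python raises IndexError)
    | some a =>
      match PySem.List.pyGet? l n with
      | none => 0  -- unreachable under Pre_fibonacciback
      | some b =>
        let k := (n - 1).toNat
        let p := fibPair k
        (if k % 2 = 1 then -1 else 1) * (p.2 * a - p.1 * b)

-- ===== PRECONDITION & SPEC =====
-- Pre_ excludes exactly the inputs where Python raises IndexError: n ≥ 2 with n out of range of l.
def Pre_fibonacciback (l : List Int) (n : Int) : Prop := n < 2 ∨ n < (l.length : Int)
instance (l : List Int) (n : Int) : Decidable (Pre_fibonacciback l n) := by unfold Pre_fibonacciback; infer_instance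
def pvWitness_fibonacciback : List Int × Int := ([3, 1, 4, 1, 5, 9], 4)

def Spec_fibonacciback (l : List Int) (n : Int) (out : Int) : Prop := out = fibonacciback_alt l n
instance (l : List Int) (n : Int) (out : Int) : Decidable (Spec_fibonacciback l n out) := by unfold Spec_fibonacciback; infer_instance

-- ===== CLAIM (what is proved, stated in full; the proofs are below) =====
def Claim_equal_fibonacciback : Prop := ∀ (l : List Int) (n : Int), Dom_fibonacciback l n → Pre_fibonacciback l n → Spec_fibonacciback l n (fibonacciback l n)

-- ===== LEMMAS AND PROOFS =====

-- fast doubling computes the Fibonacci numbers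
theorem fibPair_eq (m : Nat) : fibPair m = ((Nat.fib m : Int), (Nat.fib (m + 1) : Int)) := by
  induction m using Nat.strong_induction_on with
  | _ m ih =>
    rw [fibPair]
    by_cases h : m = 0
    · simp [h]
    · have ihh := ih (m / 2) (Nat.div_lt_self (Nat.pos_of_ne_zero h) (by norm_num))
      simp only [h, dif_neg, not_false_iff, ihh]
      have hfle : Nat.fib (m / 2) ≤ 2 * Nat.fib (m / 2 + 1) :=
        le_trans (Nat.fib_le_fib_succ) (by omega)
      rcases Nat.mod_two_eq_zero_or_one m with hp | hp
      · have h1 : Nat.fib m = Nat.fib (m / 2) * (2 * Nat.fib (m / 2 + 1) - Nat.fib (m / 2)) := by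
          conv_lhs => rw [show m = 2 * (m / 2) by omega, Nat.fib_two_mul]
        have h2 : Nat.fib (m + 1) = Nat.fib (m / 2 + 1) ^ 2 + Nat.fib (m / 2) ^ 2 := by
          conv_lhs => rw [show m + 1 = 2 * (m / 2) + 1 by omega, Nat.fib_two_mul_add_one]
        rw [if_neg (by omega)]
        refine Prod.ext ?_ ?_
        · show (_ : Int) * _ = _
          rw [h1, Nat.cast_mul, Nat.cast_sub hfle]
          push_cast; ring
        · show (_ : Int) + _ = _
          rw [h2]; push_cast; ring
      · have h1 : Nat.fib m = Nat.fib (m / 2 + 1) ^ 2 + Nat.fib (m / 2) ^ 2 := by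
          conv_lhs => rw [show m = 2 * (m / 2) + 1 by omega, Nat.fib_two_mul_add_one]
        have h2 : Nat.fib (m + 1) = Nat.fib (m / 2 + 1) * (2 * Nat.fib (m / 2) + Nat.fib (m / 2 + 1)) := by
          conv_lhs => rw [show m + 1 = 2 * (m / 2 + 1) by omega, Nat.fib_two_mul]
          have : 2 * Nat.fib (m / 2 + 1 + 1) - Nat.fib (m / 2 + 1)
              = 2 * Nat.fib (m / 2) + Nat.fib (m / 2 + 1) := by
            rw [Nat.fib_add_two]; omega
          rw [this]
        rw [if_pos (by omega)]
        refine Prod.ext ?_ ?_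
        · show (_ : Int) + _ = _
          rw [h1]; push_cast; ring
        · show (_ : Int) * _ + _ = _
          rw [h1, h2]; push_cast; ring

def pvSign (k : Nat) : Int := if k % 2 = 1 then -1 else 1

theorem pvSign_succ (k : Nat) : pvSign (k + 1) = - pvSign k := by
  unfold pvSign
  rcases Nat.mod_two_eq_zero_or_one k with h | h <;> simp [Nat.add_mod, h]

-- A's loop in closed form
theorem fibLoopA_closed (k : Nat) : ∀ a b : Int,
    fibLoopA k a b = pvSign k * ((Nat.fib (k + 1) : Int) * a - (Nat.fib k : Int) * b) := by
  induction k with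
  | zero => intro a b; simp [fibLoopA, pvSign]
  | succ k ih =>
    intro a b
    rw [fibLoopA, ih, pvSign_succ]
    have h2 : (Nat.fib (k + 2) : Int) = Nat.fib k + Nat.fib (k + 1) := by
      rw [Nat.fib_add_two]; push_cast; ring
    rw [h2]; ring

-- ===== VERDICT (by name: the statement is the Claim_ definition above) =====
theorem fibonacciback_spec : Claim_equal_fibonacciback := by
  intro l n _ hpre
  unfold Spec_fibonacciback fibonacciback fibonacciback_alt
  by_cases h2 : n < 2
  · simp [h2]
  · simp only [h2, if_neg, not_false_iff]
    have hnlen : n < (l.length : Int) := by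
      rcases hpre with h | h
      · omega
      · exact h
    rw [PySem.List.pyGet?_of_nonneg (xs := l) (i := n - 1) (by omega),
        PySem.List.pyGet?_of_nonneg (xs := l) (i := n) (by omega),
        List.getElem?_eq_getElem (by omega), List.getElem?_eq_getElem (by omega)]
    simp only [fibLoopA_closed, fibPair_eq, pvSign]
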